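-- pv_equiv track=rewrite | github.com/Yaswanthh13426789155/SAP-AI | sap_agent.py | _build_cross_issue_risks
-- ===== SOURCE A (Python) =====
-- def _append_unique(items, value, limit=None):
--     value = str(value or "").strip()
--     if not value:
--         return items
--     normalized_existing = {item.lower() for item in items}
--     if value.lower() in normalized_existing:
--         return items
--     items.append(value)
--     if limit:
--         return items[:limit]
--     return items
--
-- def _build_cross_issue_risks(workstreams):
--     if not workstreams:
--         return []
--
--     risks = [
--         "Do not assume one workaround fixes every symptom until the dependency order is proven.",
--         "Keep transports, unlocks, interface reprocessing, and role changes as separate controlled actions when multiple SAP teams are involved.",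
--         "Avoid replaying queues, IDocs, or jobs before the upstream authorization, transport, or service issue is corrected.",
--     ]
--     for workstream in workstreams[:3]:
--         area = workstream.get("area", "SAP")
--         risks = _append_unique(
--             risks,
--             f"{area} changes may hide evidence needed by the other workstreams if they are applied out of order.",
--             limit=5,
--         )
--     return risks[:5]
-- ===== SOURCE B (Python) =====
-- def _build_cross_issue_risks(workstreams):
--     if not workstreams:
--         return []
--
--     # Phase 1: gather all candidates (fixed base risks, then one message per
--     # workstream among the first three).
--     candidates = [
--         "Do not assume one workaround fixes every symptom until the dependency order is proven.",
--         "Keep transports, unlocks, interface reprocessing, and role changes as separate controlled actions when multiple SAP teams are involved.",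
--         "Avoid replaying queues, IDocs, or jobs before the upstream authorization, transport, or service issue is corrected.",
--     ] + [
--         f"{workstream.get('area', 'SAP')} changes may hide evidence needed by the other workstreams if they are applied out of order."
--         for workstream in workstreams[:3]
--     ]
--
--     # Phase 2: one order-preserving case-insensitive dedup pass, then cap at 5.
--     result = []
--     seen = set()
--     for candidate in candidates:
--         text = candidate.strip()
--         if not text:
--             continue
--         key = text.lower()
--         if key not in seen:
--             seen.add(key)
--             result.append(text)
--     return result[:5]
-- ===== Notes on version B (the rewrite author's own statement) =====
-- stated objective: alternative
-- what changed: A interleaves per-candidate append-unique steps that each recompute a normalized set of the current list and re-truncate to 5; B first gathers all candidates (base risks plus one message per of the first three workstreams), then runs one order-preserving case-insensitive dedup pass with an accumulated seen-set and applies a single final [:5] cap.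
import Mathlib
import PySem

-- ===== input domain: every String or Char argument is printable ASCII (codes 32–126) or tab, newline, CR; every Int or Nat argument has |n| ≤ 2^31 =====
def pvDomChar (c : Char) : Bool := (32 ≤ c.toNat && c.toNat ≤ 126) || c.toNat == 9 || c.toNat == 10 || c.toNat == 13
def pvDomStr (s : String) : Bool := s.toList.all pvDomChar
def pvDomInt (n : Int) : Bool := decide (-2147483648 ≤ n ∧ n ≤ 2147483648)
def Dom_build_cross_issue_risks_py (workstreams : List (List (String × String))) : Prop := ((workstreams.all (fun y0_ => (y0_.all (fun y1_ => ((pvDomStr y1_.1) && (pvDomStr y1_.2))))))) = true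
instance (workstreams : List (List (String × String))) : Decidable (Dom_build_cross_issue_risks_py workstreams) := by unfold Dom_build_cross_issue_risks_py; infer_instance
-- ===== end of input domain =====

-- B replaces A's per-step append-unique-with-cap loop with a gather-all-candidates phase
-- followed by one order-preserving case-insensitive dedup pass and a single final cap (objective: simpler decomposition).

-- ===== PORT A =====

-- port of _append_unique (A's helper)
def pvAppendUnique (items : List String) (value : String) (limit : Option Int) : List String :=
  let value := PySem.Str.strip (if value == "" then "" else value)   -- str(value or "").strip()
  if value == "" then items
  else
    let normalizedExisting : PySem.Set String := PySem.Set.ofList (items.map PySem.Str.lower)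
    if PySem.Set.contains normalizedExisting (PySem.Str.lower value) then items
    else
      let items := items ++ [value]
      match limit with
      | some l => if l ≠ 0 then PySem.List.slice items none (some l) else items   -- 'if limit:'
      | none => items

def build_cross_issue_risks_py (workstreams : List (List (String × String))) : List String :=
  if workstreams == [] then []
  else
    let risks : List String :=
      [ "Do not assume one workaround fixes every symptom until the dependency order is proven.",
        "Keep transports, unlocks, interface reprocessing, and role changes as separate controlled actions when multiple SAP teams are involved.",
        "Avoid replaying queues, IDocs, or jobs before the upstream authorization, transport, or service issue is corrected." ]
    let risks := (PySem.List.slice workstreams none (some 3)).foldl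
      (fun risks workstream =>
        let area := PySem.Dict.getD (PySem.Dict.mk workstream) "area" "SAP"
        pvAppendUnique risks
          (area ++ " changes may hide evidence needed by the other workstreams if they are applied out of order.")
          (some 5)) risks
    PySem.List.slice risks none (some 5)

-- ===== PORT B =====

-- one dedup step of B's single filtering pass (state: result so far, seen keys)
def pvDedupStep (st : List String × PySem.Set String) (candidate : String) : List String × PySem.Set String :=
  let text := PySem.Str.strip candidate
  if text == "" then st
  else
    let key := PySem.Str.lower text
    if PySem.Set.contains st.2 key then st
    else (st.1 ++ [text], PySem.Set.add st.2 key)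

def build_cross_issue_risks_py_alt (workstreams : List (List (String × String))) : List String :=
  if workstreams == [] then []
  else
    -- Phase 1: gather every candidate string
    let candidates : List String :=
      [ "Do not assume one workaround fixes every symptom until the dependency order is proven.",
        "Keep transports, unlocks, interface reprocessing, and role changes as separate controlled actions when multiple SAP teams are involved.",
        "Avoid replaying queues, IDocs, or jobs before the upstream authorization, transport, or service issue is corrected." ]
      ++ (PySem.List.slice workstreams none (some 3)).map
          (fun workstream =>
            PySem.Dict.getD (PySem.Dict.mk workstream) "area" "SAP"
              ++ " changes may hide evidence needed by the other workstreams if they are applied out of order.")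
    -- Phase 2: one order-preserving case-insensitive dedup pass, then cap at 5
    let result := (candidates.foldl pvDedupStep ([], PySem.Set.empty)).1
    PySem.List.slice result none (some 5)

-- ===== PRECONDITION & SPEC =====
def Spec_build_cross_issue_risks_py (workstreams : List (List (String × String))) (out : List String) : Prop := out = build_cross_issue_risks_py_alt workstreams
instance (workstreams : List (List (String × String))) (out : List String) : Decidable (Spec_build_cross_issue_risks_py workstreams out) := by unfold Spec_build_cross_issue_risks_py; infer_instance

-- ===== CLAIM (what is proved, stated in full; the proofs are below) =====
def Claim_equal_build_cross_issue_risks_py : Prop := ∀ (workstreams : List (List (String × String))), Dom_build_cross_issue_risks_py workstreams → Spec_build_cross_issue_risks_py workstreams (build_cross_issue_risks_py workstreams)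

-- ===== LEMMAS AND PROOFS =====

lemma pv_strip_guard (c : String) :
    PySem.Str.strip (if c == "" then "" else c) = PySem.Str.strip c := by
  by_cases hc : c = "" <;> simp [hc]

lemma pv_take_append_take {α : Type} (l : List α) (x : α) (n : Nat) :
    ((l.take n) ++ [x]).take n = (l ++ [x]).take n := by
  rcases Nat.le_total l.length n with h | h
  · rw [List.take_of_length_le h]
  · rw [List.take_append_of_le_length (by simpa using h),
        List.take_append_of_le_length h, List.take_take, Nat.min_self]

-- what one A step does, phrased over plain lists
lemma pvAppendUnique_char (items : List String) (c : String) :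
    pvAppendUnique items c (some 5) =
      if PySem.Str.strip c = "" then items
      else if PySem.Str.lower (PySem.Str.strip c) ∈ items.map PySem.Str.lower then items
      else (items ++ [PySem.Str.strip c]).take 5 := by
  unfold pvAppendUnique
  rw [pv_strip_guard]
  by_cases h0 : PySem.Str.strip c = ""
  · simp [h0]
  · simp only [h0, beq_iff_eq, if_false]
    by_cases hm : PySem.Str.lower (PySem.Str.strip c) ∈ items.map PySem.Str.lower
    · have hb : (PySem.Set.ofList (items.map PySem.Str.lower)).contains
          (PySem.Str.lower (PySem.Str.strip c)) = true := by
        simpa [PySem.Set.contains_iff, PySem.Set.mem_ofList] using hm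
      simp [hm]
    · have hb : (PySem.Set.ofList (items.map PySem.Str.lower)).contains
          (PySem.Str.lower (PySem.Str.strip c)) = false := by
        simpa [PySem.Set.contains_iff, PySem.Set.mem_ofList] using hm
      simp only [hb, hm, if_false, Bool.false_eq_true, ne_eq, OfNat.ofNat_ne_zero,
        not_false_iff, if_true]
      rw [PySem.List.slice_to _ (by norm_num)]
      simp

-- what one B step does, when the seen set is the lowered result
lemma pvDedupStep_char (res : List String) (c : String) :
    pvDedupStep (res, res.map PySem.Str.lower) c =
      if PySem.Str.strip c = "" then (res, res.map PySem.Str.lower)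
      else if PySem.Str.lower (PySem.Str.strip c) ∈ res.map PySem.Str.lower then
        (res, res.map PySem.Str.lower)
      else (res ++ [PySem.Str.strip c], (res ++ [PySem.Str.strip c]).map PySem.Str.lower) := by
  unfold pvDedupStep
  by_cases h0 : PySem.Str.strip c = ""
  · simp [h0]
  · simp only [h0, beq_iff_eq, if_false]
    by_cases hm : PySem.Str.lower (PySem.Str.strip c) ∈ res.map PySem.Str.lower
    · have hb : PySem.Set.contains (res.map PySem.Str.lower)
          (PySem.Str.lower (PySem.Str.strip c)) = true := by
        simpa [PySem.Set.contains_iff] using hm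
      simp [hm]
    · have hb : PySem.Set.contains (res.map PySem.Str.lower)
          (PySem.Str.lower (PySem.Str.strip c)) = false := by
        simpa [PySem.Set.contains_iff] using hm
      simp only [hb, hm, if_false, Bool.false_eq_true]
      rw [PySem.Set.add, if_neg (by rw [hb]; exact Bool.false_ne_true)]
      simp

-- invariant: A's risk list is the 5-cap of B's result, and B's seen set is the lowered result
lemma pv_loop_eq (ms : List String) : ∀ (res : List String),
    ms.foldl (fun r v => pvAppendUnique r v (some 5)) (res.take 5)
      = ((ms.foldl pvDedupStep (res, res.map PySem.Str.lower)).1).take 5 := by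
  induction ms with
  | nil => intro res; rfl
  | cons c ms ih =>
    intro res
    rw [List.foldl_cons, List.foldl_cons, pvAppendUnique_char, pvDedupStep_char]
    by_cases h0 : PySem.Str.strip c = ""
    · simp only [h0, if_pos]
      exact ih res
    · by_cases hmem : PySem.Str.lower (PySem.Str.strip c) ∈ res.map PySem.Str.lower
      · by_cases hmem5 : PySem.Str.lower (PySem.Str.strip c) ∈ (res.map PySem.Str.lower).take 5
        · simp only [h0, hmem, hmem5, List.map_take, if_false, if_true]
          exact ih res
        · have hlen : 5 ≤ res.length := by
            by_contra hlt
            rw [List.take_of_length_le (by simp; omega)] at hmem5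
            exact hmem5 hmem
          have hcap : ((res.take 5) ++ [PySem.Str.strip c]).take 5 = res.take 5 := by
            rw [List.take_append_of_le_length (by simp [hlen]), List.take_take, Nat.min_self]
          simp only [h0, hmem, hmem5, List.map_take, if_false, if_true, hcap]
          exact ih res
      · have hmem5 : PySem.Str.lower (PySem.Str.strip c) ∉ (res.map PySem.Str.lower).take 5 :=
          fun h => hmem (List.mem_of_mem_take h)
        simp only [h0, hmem, hmem5, List.map_take, if_false]
        rw [pv_take_append_take]
        have := ih (res ++ [PySem.Str.strip c])
        simpa using this

-- ===== VERDICT (by name: the statement is the Claim_ definition above) =====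
set_option maxRecDepth 100000 in
set_option maxHeartbeats 2000000 in
theorem build_cross_issue_risks_py_spec : Claim_equal_build_cross_issue_risks_py := by
  intro ws _
  unfold Spec_build_cross_issue_risks_py build_cross_issue_risks_py build_cross_issue_risks_py_alt
  by_cases h : ws == []
  · simp [h]
  · simp only [h, Bool.false_eq_true, if_false]
    rw [List.foldl_append]
    have hbase :
        ([ "Do not assume one workaround fixes every symptom until the dependency order is proven.",
           "Keep transports, unlocks, interface reprocessing, and role changes as separate controlled actions when multiple SAP teams are involved.",
           "Avoid replaying queues, IDocs, or jobs before the upstream authorization, transport, or service issue is corrected." ] :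
          List String).foldl pvDedupStep ([], PySem.Set.empty)
        = ([ "Do not assume one workaround fixes every symptom until the dependency order is proven.",
             "Keep transports, unlocks, interface reprocessing, and role changes as separate controlled actions when multiple SAP teams are involved.",
             "Avoid replaying queues, IDocs, or jobs before the upstream authorization, transport, or service issue is corrected." ],
           ([ "Do not assume one workaround fixes every symptom until the dependency order is proven.",
              "Keep transports, unlocks, interface reprocessing, and role changes as separate controlled actions when multiple SAP teams are involved.",
              "Avoid replaying queues, IDocs, or jobs before the upstream authorization, transport, or service issue is corrected." ] :
             List String).map PySem.Str.lower) := by decide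
    rw [hbase, ← List.foldl_map (f := fun workstream =>
        PySem.Dict.getD (PySem.Dict.mk workstream) "area" "SAP"
          ++ " changes may hide evidence needed by the other workstreams if they are applied out of order.")
        (g := fun r v => pvAppendUnique r v (some 5))]
    rw [show ([ "Do not assume one workaround fixes every symptom until the dependency order is proven.",
           "Keep transports, unlocks, interface reprocessing, and role changes as separate controlled actions when multiple SAP teams are involved.",
           "Avoid replaying queues, IDocs, or jobs before the upstream authorization, transport, or service issue is corrected." ] : List String)
        = ([ "Do not assume one workaround fixes every symptom until the dependency order is proven.",
           "Keep transports, unlocks, interface reprocessing, and role changes as separate controlled actions when multiple SAP teams are involved.",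
           "Avoid replaying queues, IDocs, or jobs before the upstream authorization, transport, or service issue is corrected." ] : List String).take 5 from rfl]
    rw [pv_loop_eq]
    have hs : ∀ (xs : List String), PySem.List.slice xs none (some 5) = xs.take 5 := by
      intro xs
      rw [PySem.List.slice_to _ (by norm_num)]
      simp
    simp [hs, List.take_take]
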